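-- pv_equiv track=rewrite | github.com/dagster-io/dagster | python_modules/automation/automation/dagster_dev/commands/dg_api_record.py | generate_query_name
-- ===== SOURCE A (Python) =====
-- def generate_query_name(query: str) -> str:
--     """Generate a descriptive name from GraphQL query."""
--     lines = query.strip().split("\n")
--     for line in lines:
--         stripped_line = line.strip()
--         if stripped_line.startswith(("query ", "mutation ")):
--             # Extract name after 'query ' or 'mutation '
--             parts = stripped_line.split()
--             if len(parts) > 1:
--                 name = parts[1].split("(")[0]  # Remove parameters
--                 return name.lower()
--
--     # Fallback to generic names based on query content
--     if "assetRecords" in query: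
--         return "asset_records_query"
--     elif "assetNodes" in query:
--         return "asset_nodes_query"
--     elif "deployment" in query.lower():
--         return "deployment_query"
--     else:
--         return "graphql_query"
-- ===== SOURCE B (Python) =====
-- def generate_query_name(query: str) -> str:
--     """Generate a descriptive name from GraphQL query."""
--     s = query.strip()
--     n = len(s)
--     i = 0
--     while i < n:
--         # i is at the start of a line: skip its leading (non-newline) whitespace
--         while i < n and s[i] in " \t\r\x0b\x0c":
--             i += 1
--         for kw in ("query ", "mutation "):
--             if s.startswith(kw, i):
--                 j = i + len(kw)
--                 while j < n and s[j] in " \t\r\x0b\x0c":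
--                     j += 1
--                 if j < n and s[j] != "\n":
--                     k = j
--                     while k < n and s[k] not in " \t\n\r\x0b\x0c(":
--                         k += 1
--                     return s[j:k].lower()
--                 break
--         # advance to just past the next newline
--         while i < n and s[i] != "\n":
--             i += 1
--         i += 1
--
--     if "assetRecords" in query:
--         return "asset_records_query"
--     if "assetNodes" in query:
--         return "asset_nodes_query"
--     if "deployment" in query.lower():
--         return "deployment_query"
--     return "graphql_query"
-- ===== Notes on version B (the rewrite author's own statement) =====
-- stated objective: alternative
-- what changed: A splits the stripped query into a list of lines and runs per-line strip/startswith/str.split() tokenization; B never builds lines: it walks the string once with an explicit cursor as a small state machine (skip a line's leading whitespace, try the two keywords, skip inter-word whitespace, read the name token up to whitespace or an opening parenthesis, else jump past the next newline), keeping the same fallback substring chain; it trades A's library-call pipeline for explicit index scanning of similar cost.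
import Mathlib
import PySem

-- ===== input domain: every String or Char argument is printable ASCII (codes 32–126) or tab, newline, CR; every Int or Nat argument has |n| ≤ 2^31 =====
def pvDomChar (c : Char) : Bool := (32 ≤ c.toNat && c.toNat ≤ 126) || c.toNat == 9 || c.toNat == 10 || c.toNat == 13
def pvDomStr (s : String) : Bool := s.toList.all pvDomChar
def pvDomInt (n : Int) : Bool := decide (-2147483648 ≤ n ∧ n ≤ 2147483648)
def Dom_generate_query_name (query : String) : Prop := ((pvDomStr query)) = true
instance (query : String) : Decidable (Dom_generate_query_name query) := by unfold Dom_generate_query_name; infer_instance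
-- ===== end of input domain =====

-- B replaces A's split-into-lines / per-line strip+startswith+split() pipeline by a single
-- left-to-right character scan with an explicit cursor (idiomatic single-pass state machine).

-- ===== PORT A =====
def pvFallbackA (query : String) : String :=
  if PySem.Str.isIn "assetRecords" query then "asset_records_query"
  else if PySem.Str.isIn "assetNodes" query then "asset_nodes_query"
  else if PySem.Str.isIn "deployment" (PySem.Str.lower query) then "deployment_query"
  else "graphql_query"

def pvLoopA (query : String) : List String → String
  | [] => pvFallbackA query
  | line :: rest =>
    let stripped := PySem.Str.strip line
    if PySem.Str.startswith stripped "query " || PySem.Str.startswith stripped "mutation " then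
      let parts := PySem.Str.split₀ stripped
      if 1 < parts.length then
        -- parts[1].split("(")[0], then .lower()
        PySem.Str.lower (((PySem.Str.split? (parts.getD 1 "") "(").getD []).headD "")
      else pvLoopA query rest
    else pvLoopA query rest

def generate_query_name (query : String) : String :=
  pvLoopA query ((PySem.Str.split? (PySem.Str.strip query) "\n").getD [])

-- ===== PORT B =====
-- Source B's character tests, exactly: `s[i] in " \t\r\x0b\x0c"` is "whitespace other than newline",
-- `s[k] not in " \t\n\r\x0b\x0c("` is "not whitespace and not '('" (exact: those literal sets
-- are Python's str.isspace set minus/including '\n' restricted to the ASCII range PySem covers).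
def pvNlWS (c : Char) : Bool := PySem.Chars.isspace c && !(c == '\n')

def pvTokChar (c : Char) : Bool := !PySem.Chars.isspace c && !(c == '(')

-- the `for kw in ("query ", "mutation "): if s.startswith(kw, i)` test: the matched keyword's tail
def pvKw (cs : List Char) : Option (List Char) :=
  if "query ".toList.isPrefixOf cs then some (cs.drop 6)
  else if "mutation ".toList.isPrefixOf cs then some (cs.drop 9)
  else none

-- one outer-loop iteration of Source B from a line start: skip the line's leading whitespace,
-- try the two keywords, skip whitespace after the keyword, take the token (or fail)
def pvHit (cs : List Char) : Option (List Char) :=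
  match pvKw (cs.dropWhile pvNlWS) with
  | none => none
  | some rest =>
    match rest.dropWhile pvNlWS with
    | [] => none
    | d :: ds => if d = '\n' then none else some ((d :: ds).takeWhile pvTokChar)

-- Source B's outer `while i < n` loop: one pvHit attempt per line, then advance past the next newline
def pvScan : List Char → Option (List Char)
  | [] => none
  | c :: cs =>
    match pvHit (c :: cs) with
    | some tok => some tok
    | none =>
      match h : (c :: cs).dropWhile (fun x => !(x == '\n')) with
      | [] => none
      | _ :: t => pvScan t
termination_by cs => cs.length
decreasing_by
  have h1 : ((c :: cs).dropWhile (fun x => !(x == '\n'))).length ≤ (c :: cs).length :=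
    List.length_dropWhile_le _ _
  rw [h] at h1
  simp at h1 ⊢
  omega

def generate_query_name_alt (query : String) : String :=
  match pvScan (PySem.Str.strip query).toList with
  | some tok => String.ofList (PySem.Chars.lower tok)
  | none =>
    if PySem.Str.isIn "assetRecords" query then "asset_records_query"
    else if PySem.Str.isIn "assetNodes" query then "asset_nodes_query"
    else if PySem.Str.isIn "deployment" (PySem.Str.lower query) then "deployment_query"
    else "graphql_query"

-- ===== PRECONDITION & SPEC =====
def Spec_generate_query_name (query : String) (out : String) : Prop := out = generate_query_name_alt query
instance (query : String) (out : String) : Decidable (Spec_generate_query_name query out) := by unfold Spec_generate_query_name; infer_instance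

-- ===== CLAIM (what is proved, stated in full; the proofs are below) =====
def Claim_equal_generate_query_name : Prop := ∀ (query : String), Dom_generate_query_name query → Spec_generate_query_name query (generate_query_name query)


-- ===== LEMMAS AND PROOFS =====

-- generic congruence for dropWhile/takeWhile over the elements actually present
theorem pv_dropWhile_congr {α : Type} (p q : α → Bool) (l : List α)
    (h : ∀ x ∈ l, p x = q x) : l.dropWhile p = l.dropWhile q := by
  induction l with
  | nil => rfl
  | cons a l ih =>
    rw [List.dropWhile_cons, List.dropWhile_cons, h a (by simp)]
    split_ifs with hq
    · exact ih (fun x hx => h x (by simp [hx]))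
    · rfl

theorem pv_takeWhile_congr {α : Type} (p q : α → Bool) (l : List α)
    (h : ∀ x ∈ l, p x = q x) : l.takeWhile p = l.takeWhile q := by
  induction l with
  | nil => rfl
  | cons a l ih =>
    rw [List.takeWhile_cons, List.takeWhile_cons, h a (by simp)]
    split_ifs with hq
    · rw [ih (fun x hx => h x (by simp [hx]))]
    · rfl

theorem pv_takeWhile_append_eq {α : Type} (p : α → Bool) (a b : List α)
    (hb : b.takeWhile p = []) : (a ++ b).takeWhile p = a.takeWhile p := by
  rw [List.takeWhile_append]
  split_ifs with h
  · rw [hb, List.append_nil, (List.takeWhile_prefix p).eq_of_length h]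
  · rfl

theorem pv_dropWhile_head {α : Type} (p : α → Bool) (l : List α) (d : α) (t : List α)
    (h : l.dropWhile p = d :: t) : p d = false := by
  have := List.head?_dropWhile_not p l
  rw [h] at this; simpa using this

-- character-class facts
theorem pv_nlws_isspace {c : Char} (h : pvNlWS c = true) : PySem.Chars.isspace c = true := by
  unfold pvNlWS at h; exact ((Bool.and_eq_true _ _).mp h).1

theorem pv_isspace_of_not_nlws {c : Char} (h1 : pvNlWS c = false) (h2 : c ≠ '\n') :
    PySem.Chars.isspace c = false := by
  unfold pvNlWS at h1
  cases hs : PySem.Chars.isspace c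
  · rfl
  · rw [hs] at h1; simp at h1; exact absurd h1 h2

-- ---- splitOn on a single-character separator ----

theorem pv_splitOn_go_acc (sep : List Char) :
    ∀ (fuel : Nat) (l cur : List Char) (acc : List (List Char)),
      PySem.Chars.splitOn.go sep fuel l cur acc =
        acc.reverse ++ PySem.Chars.splitOn.go sep fuel l cur [] := by
  intro fuel
  induction fuel with
  | zero => intro l cur acc; simp [PySem.Chars.splitOn.go]
  | succ f ih =>
    intro l cur acc
    cases l with
    | nil => simp [PySem.Chars.splitOn.go]
    | cons c rest =>
      simp only [PySem.Chars.splitOn.go]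
      split_ifs with h
      · rw [ih _ [] (cur.reverse :: acc), ih _ [] [cur.reverse]]; simp
      · exact ih _ _ _

theorem pv_splitOn_go_consume (c : Char) (w : List Char) :
    ∀ (fuel : Nat) (rest cur : List Char) (acc : List (List Char)),
      c ∉ w → w.length ≤ fuel →
      PySem.Chars.splitOn.go [c] fuel (w ++ rest) cur acc =
        PySem.Chars.splitOn.go [c] (fuel - w.length) rest (w.reverse ++ cur) acc := by
  induction w with
  | nil => intro fuel rest cur acc _ _; simp
  | cons a w ih =>
    intro fuel rest cur acc hc hf
    cases fuel with
    | zero => simp at hf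
    | succ f =>
      have ha : a ≠ c := fun h => hc (by simp [h])
      have hpre : [c].isPrefixOf (a :: (w ++ rest)) = false := by
        simp [List.isPrefixOf]
        exact fun h => absurd h.symm ha
      simp only [List.cons_append, PySem.Chars.splitOn.go, hpre, Bool.false_eq_true, if_false]
      rw [ih f rest (a :: cur) acc (fun h => hc (by simp [h])) (by simpa using hf)]
      simp [Nat.succ_sub_succ]

theorem pv_splitOn_go_nil (sep : List Char) (fuel : Nat) (cur : List Char) (acc : List (List Char)) :
    PySem.Chars.splitOn.go sep fuel [] cur acc = (cur.reverse :: acc).reverse := by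
  cases fuel <;> simp [PySem.Chars.splitOn.go]

theorem pv_splitOn_nosep (c : Char) (w : List Char) (hw : c ∉ w) :
    PySem.Chars.splitOn w [c] = [w] := by
  unfold PySem.Chars.splitOn
  have h1 : PySem.Chars.splitOn.go [c] (w.length + 1) (w ++ []) [] [] =
      PySem.Chars.splitOn.go [c] (w.length + 1 - w.length) [] (w.reverse ++ []) [] :=
    pv_splitOn_go_consume c w (w.length + 1) [] [] [] hw (by omega)
  rw [List.append_nil] at h1
  rw [h1, pv_splitOn_go_nil]
  simp

theorem pv_splitOn_cons (c : Char) (w t : List Char) (hw : c ∉ w) :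
    PySem.Chars.splitOn (w ++ c :: t) [c] = w :: PySem.Chars.splitOn t [c] := by
  unfold PySem.Chars.splitOn
  rw [pv_splitOn_go_consume c w ((w ++ c :: t).length + 1) (c :: t) [] [] hw (by simp; omega)]
  have hlen : (w ++ c :: t).length + 1 - w.length = t.length + 2 := by simp; omega
  rw [hlen]
  have hpre : [c].isPrefixOf (c :: t) = true := by simp [List.isPrefixOf]
  simp only [PySem.Chars.splitOn.go, hpre, if_true]
  rw [pv_splitOn_go_acc]
  simp

theorem pv_splitOn_head (c : Char) (l : List Char) :
    (PySem.Chars.splitOn l [c]).headD [] = l.takeWhile (fun x => !(x == c)) := by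
  have hdec := List.takeWhile_append_dropWhile (p := fun x => !(x == c)) (l := l)
  have hmem : c ∉ l.takeWhile (fun x => !(x == c)) := by
    intro h
    have := List.mem_takeWhile_imp h
    simp at this
  cases hd : l.dropWhile (fun x => !(x == c)) with
  | nil =>
    rw [hd, List.append_nil] at hdec
    rw [← hdec, pv_splitOn_nosep c _ hmem]
    simp [hdec]
  | cons d t =>
    have hdc : d = c := by
      have := pv_dropWhile_head _ _ _ _ hd
      simpa using this
    subst hdc
    conv_lhs => rw [← hdec, hd, pv_splitOn_cons d _ t hmem]
    simp

-- ---- split₀ (str.split()) ----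

theorem pv_split₀_go_acc (s cur : List Char) (acc : List (List Char)) :
    PySem.Chars.split₀.go s cur acc = acc.reverse ++ PySem.Chars.split₀.go s cur [] := by
  induction s generalizing cur acc with
  | nil =>
    simp only [PySem.Chars.split₀.go]
    split_ifs <;> simp
  | cons c s ih =>
    simp only [PySem.Chars.split₀.go]
    split_ifs with h1 h2
    · exact ih _ _
    · rw [ih [] (cur.reverse :: acc), ih [] [cur.reverse]]; simp
    · exact ih _ _

theorem pv_split₀_go_append (w s cur : List Char) (acc : List (List Char))
    (hw : ∀ c ∈ w, PySem.Chars.isspace c = false) :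
    PySem.Chars.split₀.go (w ++ s) cur acc = PySem.Chars.split₀.go s (w.reverse ++ cur) acc := by
  induction w generalizing cur with
  | nil => simp
  | cons c w ih =>
    have hc : PySem.Chars.isspace c = false := hw c (by simp)
    simp only [List.cons_append, PySem.Chars.split₀.go, hc, Bool.false_eq_true, if_false]
    rw [ih _ (fun x hx => hw x (by simp [hx]))]
    simp

theorem pv_split₀_keyword (w t : List Char) (hw0 : w ≠ [])
    (hw : ∀ c ∈ w, PySem.Chars.isspace c = false) :
    PySem.Chars.split₀ (w ++ ' ' :: t) = w :: PySem.Chars.split₀ t := by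
  unfold PySem.Chars.split₀
  rw [pv_split₀_go_append w (' ' :: t) [] [] hw]
  simp only [List.append_nil, PySem.Chars.split₀.go]
  have hsp : PySem.Chars.isspace ' ' = true := by decide
  have hne : (w.reverse).isEmpty = false := by
    cases w with
    | nil => exact absurd rfl hw0
    | cons a l => simp
  simp only [hsp, if_true, hne, Bool.false_eq_true, if_false, List.reverse_reverse]
  rw [pv_split₀_go_acc t [] [w]]
  simp

theorem pv_split₀_ws_skip (w l : List Char) (hw : ∀ c ∈ w, PySem.Chars.isspace c = true) :
    PySem.Chars.split₀ (w ++ l) = PySem.Chars.split₀ l := by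
  induction w with
  | nil => simp
  | cons c w ih =>
    have hc := hw c (by simp)
    show PySem.Chars.split₀.go _ _ _ = _
    simp only [List.cons_append, PySem.Chars.split₀.go, hc, if_true, List.isEmpty_nil]
    exact ih (fun x hx => hw x (by simp [hx]))

theorem pv_split₀_head (d : Char) (ds : List Char) (hd : PySem.Chars.isspace d = false) :
    PySem.Chars.split₀ (d :: ds) =
      ((d :: ds).takeWhile (fun c => !PySem.Chars.isspace c)) ::
        PySem.Chars.split₀ ((d :: ds).dropWhile (fun c => !PySem.Chars.isspace c)) := by
  have hdec := List.takeWhile_append_dropWhile (p := fun c => !PySem.Chars.isspace c) (l := d :: ds)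
  set tok := (d :: ds).takeWhile (fun c => !PySem.Chars.isspace c) with htok
  set rem := (d :: ds).dropWhile (fun c => !PySem.Chars.isspace c) with hrem
  have htoknws : ∀ c ∈ tok, PySem.Chars.isspace c = false := by
    intro c hc
    have := List.mem_takeWhile_imp hc
    simpa using this
  have htokne : tok ≠ [] := by
    rw [htok, List.takeWhile_cons, if_pos (by simp [hd])]
    simp
  conv_lhs => rw [← hdec]
  unfold PySem.Chars.split₀
  rw [pv_split₀_go_append tok rem [] [] htoknws]
  cases hr : rem with
  | nil =>
    simp only [List.append_nil, PySem.Chars.split₀.go]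
    have : (tok.reverse).isEmpty = false := by
      cases htk : tok with
      | nil => exact absurd htk htokne
      | cons a l => simp
    simp [this]
  | cons e rem' =>
    have he : PySem.Chars.isspace e = true := by
      have hr' : List.dropWhile (fun c => !PySem.Chars.isspace c) (d :: ds) = e :: rem' :=
        hrem ▸ hr
      have := pv_dropWhile_head _ _ _ _ hr'
      simpa using this
    have hne : (tok.reverse).isEmpty = false := by
      cases htk : tok with
      | nil => exact absurd htk htokne
      | cons a l => simp
    simp only [List.append_nil, PySem.Chars.split₀.go, he, if_true, hne, Bool.false_eq_true,
      if_false, List.reverse_reverse]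
    rw [pv_split₀_go_acc rem' [] [tok]]
    simp only [List.reverse_cons, List.reverse_nil, List.nil_append, List.cons_append,
      List.cons.injEq]
    refine ⟨trivial, ?_⟩
    simp

-- ---- rstrip ----

theorem pv_rstrip_prefix (l : List Char) : PySem.Chars.rstrip l <+: l := by
  unfold PySem.Chars.rstrip
  have := List.dropWhile_suffix (l := l.reverse) PySem.Chars.isspace
  rw [← List.reverse_prefix] at this
  simpa using this

theorem pv_rstrip_append_ws (a b : List Char) (hb : ∀ x ∈ b, PySem.Chars.isspace x = true) :
    PySem.Chars.rstrip (a ++ b) = PySem.Chars.rstrip a := by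
  unfold PySem.Chars.rstrip
  rw [List.reverse_append, List.dropWhile_append]
  rw [List.dropWhile_eq_nil_iff.mpr (by intro x hx; exact hb x (by simpa using hx))]
  simp

theorem pv_rstrip_append_nonws (a b : List Char) (hb : ∃ x ∈ b, PySem.Chars.isspace x = false) :
    PySem.Chars.rstrip (a ++ b) = a ++ PySem.Chars.rstrip b := by
  unfold PySem.Chars.rstrip
  rw [List.reverse_append, List.dropWhile_append]
  have hne : (List.dropWhile PySem.Chars.isspace b.reverse).isEmpty = false := by
    rw [List.isEmpty_eq_false_iff, Ne, List.dropWhile_eq_nil_iff]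
    intro h
    obtain ⟨x, hx, hxs⟩ := hb
    rw [h x (by simpa using hx)] at hxs
    exact absurd hxs (by simp)
  rw [if_neg (by simp [hne])]
  simp

theorem pv_rstrip_nonws (b : List Char) (hb : ∀ x ∈ b, PySem.Chars.isspace x = false) :
    PySem.Chars.rstrip b = b := by
  unfold PySem.Chars.rstrip
  rw [List.dropWhile_eq_self_iff.mpr]
  · simp
  · intro h
    have hne : b.reverse ≠ [] := List.length_pos_iff.mp h
    have : b.reverse.head hne ∈ b.reverse := List.head_mem hne
    rw [hb _ (by simpa using this)]
    simp

theorem pv_rstrip_decomp (v : List Char) :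
    ∃ tl, v = PySem.Chars.rstrip v ++ tl ∧ ∀ x ∈ tl, PySem.Chars.isspace x = true := by
  refine ⟨(v.reverse.takeWhile PySem.Chars.isspace).reverse, ?_, ?_⟩
  · unfold PySem.Chars.rstrip
    rw [← List.reverse_append, List.takeWhile_append_dropWhile]
    simp
  · intro x hx
    exact List.mem_takeWhile_imp (by simpa using hx)

theorem pv_rstrip_cons_nonws (d : Char) (ds : List Char) (hd : PySem.Chars.isspace d = false) :
    ∃ ds', PySem.Chars.rstrip (d :: ds) = d :: ds' := by
  have hne : PySem.Chars.rstrip (d :: ds) ≠ [] := by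
    unfold PySem.Chars.rstrip
    simp only [ne_eq, List.reverse_eq_nil_iff, List.dropWhile_eq_nil_iff]
    intro h
    have := h d (by simp)
    rw [hd] at this
    exact absurd this (by simp)
  have hpre := pv_rstrip_prefix (d :: ds)
  cases hr : PySem.Chars.rstrip (d :: ds) with
  | nil => exact absurd hr hne
  | cons e es =>
    rw [hr] at hpre
    obtain ⟨t, ht⟩ := hpre
    simp at ht
    exact ⟨es, by rw [ht.1]⟩

-- ---- prefixes across the end of a line ----

theorem pv_prefix_line (p u rest : List Char)
    (hrest : rest = [] ∨ ∃ t, rest = '\n' :: t) (hp : '\n' ∉ p) :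
    p <+: u ++ rest ↔ p <+: u := by
  constructor
  · intro h
    induction p generalizing u with
    | nil => simp
    | cons a p ih =>
      cases u with
      | nil =>
        exfalso
        rcases hrest with rfl | ⟨t, rfl⟩
        · simp at h
        · simp at h
          exact hp (by simp [h.1])
      | cons b u =>
        simp only [List.cons_append, List.cons_prefix_cons] at h ⊢
        exact ⟨h.1, ih u (fun hm => hp (by simp [hm])) h.2⟩
  · intro h
    exact h.trans (List.prefix_append u rest)

-- dropWhile pvNlWS passes through the end-of-line marker
theorem pv_dropWhile_nlws_append (a rest : List Char)
    (hrest : rest = [] ∨ ∃ t, rest = '\n' :: t) :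
    (a ++ rest).dropWhile pvNlWS = a.dropWhile pvNlWS ++ rest := by
  have hr : rest.dropWhile pvNlWS = rest := by
    rcases hrest with rfl | ⟨t, rfl⟩
    · rfl
    · rw [List.dropWhile_cons, if_neg (by decide)]
  rw [List.dropWhile_append]
  split_ifs with h
  · rw [List.isEmpty_iff] at h
    rw [h, hr]
    simp
  · rfl

-- the token A extracts from parts[1] equals B's token read straight from the line tail
theorem pv_token_eq (d : Char) (ds : List Char) (_hd : PySem.Chars.isspace d = false) :
    ((PySem.Chars.rstrip (d :: ds)).takeWhile (fun c => !PySem.Chars.isspace c)).takeWhile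
        (fun x => !(x == '(')) = (d :: ds).takeWhile pvTokChar := by
  rw [List.takeWhile_takeWhile]
  have hcongr : ∀ x ∈ PySem.Chars.rstrip (d :: ds),
      (fun a => decide ((!(a == '(')) = true ∧ (!PySem.Chars.isspace a) = true)) x = pvTokChar x := by
    intro x _
    unfold pvTokChar
    cases h1 : PySem.Chars.isspace x <;> cases h2 : x == '(' <;> simp [h1, h2]
  rw [pv_takeWhile_congr _ _ _ hcongr]
  obtain ⟨tl, hdec, htl⟩ := pv_rstrip_decomp (d :: ds)
  conv_rhs => rw [hdec]
  rw [pv_takeWhile_append_eq]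
  cases htl' : tl with
  | nil => rfl
  | cons e t =>
    rw [List.takeWhile_cons, if_neg]
    have he := htl e (by simp [htl'])
    unfold pvTokChar
    simp [he]

-- parts of A's stripped line, after a keyword matched with a name token present
theorem pv_parts (base v0 : List Char) (d : Char) (ds : List Char)
    (hbs : ∀ c ∈ base, PySem.Chars.isspace c = false) (hb0 : base ≠ [])
    (hv : v0.dropWhile pvNlWS = d :: ds) (hd : PySem.Chars.isspace d = false) :
    PySem.Chars.split₀ (PySem.Chars.rstrip (base ++ ' ' :: v0)) =
      base :: ((PySem.Chars.rstrip (d :: ds)).takeWhile (fun c => !PySem.Chars.isspace c)) ::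
        PySem.Chars.split₀ ((PySem.Chars.rstrip (d :: ds)).dropWhile (fun c => !PySem.Chars.isspace c)) := by
  have hw1 : v0 = v0.takeWhile pvNlWS ++ (d :: ds) := by
    conv_lhs => rw [← List.takeWhile_append_dropWhile (p := pvNlWS) (l := v0)]
    rw [hv]
  have hw1ws : ∀ c ∈ v0.takeWhile pvNlWS, PySem.Chars.isspace c = true := by
    intro c hc
    exact pv_nlws_isspace (List.mem_takeWhile_imp hc)
  have hstrip : PySem.Chars.rstrip (base ++ ' ' :: v0) =
      (base ++ ' ' :: v0.takeWhile pvNlWS) ++ PySem.Chars.rstrip (d :: ds) := by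
    have : base ++ ' ' :: v0 = (base ++ ' ' :: v0.takeWhile pvNlWS) ++ (d :: ds) := by
      conv_lhs => rw [hw1]
      simp
    rw [this, pv_rstrip_append_nonws _ _ ⟨d, by simp, hd⟩]
  rw [hstrip]
  obtain ⟨ds', hds'⟩ := pv_rstrip_cons_nonws d ds hd
  have hassoc : (base ++ ' ' :: v0.takeWhile pvNlWS) ++ PySem.Chars.rstrip (d :: ds) =
      base ++ ' ' :: (v0.takeWhile pvNlWS ++ PySem.Chars.rstrip (d :: ds)) := by simp
  rw [hassoc, pv_split₀_keyword base _ hb0 hbs,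
    pv_split₀_ws_skip _ _ hw1ws, hds', pv_split₀_head d ds' hd, ← hds']

-- A skips a line whose keyword is followed only by whitespace
theorem pv_stripped_nomatch (base v0 : List Char)
    (hbs : ∀ c ∈ base, PySem.Chars.isspace c = false)
    (hv : v0.dropWhile pvNlWS = []) :
    PySem.Chars.rstrip (base ++ ' ' :: v0) = base := by
  have hws : ∀ x ∈ (' ' :: v0), PySem.Chars.isspace x = true := by
    intro x hx
    rcases List.mem_cons.mp hx with rfl | hx'
    · decide
    · have hall := List.dropWhile_eq_nil_iff.mp hv x hx'
      exact pv_nlws_isspace hall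
  rw [show base ++ ' ' :: v0 = base ++ (' ' :: v0) from rfl,
    pv_rstrip_append_ws _ _ hws, pv_rstrip_nonws _ hbs]

-- map-level helpers for the Str wrappers
theorem pv_headD_map_ofList (L : List (List Char)) :
    ((L.map String.ofList).headD "") = String.ofList (L.headD []) := by
  cases L <;> rfl

-- ---- the per-line step: A's loop body agrees with pvHit ----

set_option maxRecDepth 4096 in
theorem pv_line (q : String) (ls : List String) (w rest : List Char)
    (hw : '\n' ∉ w) (hrest : rest = [] ∨ ∃ t, rest = '\n' :: t) :
    pvLoopA q (String.ofList w :: ls) =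
      match pvHit (w ++ rest) with
      | some tok => String.ofList (PySem.Chars.lower tok)
      | none => pvLoopA q ls := by
  have huw : (w ++ rest).dropWhile pvNlWS = w.dropWhile pvNlWS ++ rest :=
    pv_dropWhile_nlws_append w rest hrest
  set u := w.dropWhile pvNlWS with hu
  have hunl : '\n' ∉ u := fun h => hw ((List.dropWhile_sublist _ (l := w)).mem h)
  have hlstrip : PySem.Chars.lstrip w = u := by
    unfold PySem.Chars.lstrip
    exact pv_dropWhile_congr _ _ w (fun x hx => by
      unfold pvNlWS
      have : (x == '\n') = false := by
        simp only [beq_eq_false_iff_ne, ne_eq]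
        intro h; exact hw (h ▸ hx)
      rw [this]
      simp)
  have hstrip : (PySem.Str.strip (String.ofList w)).toList = PySem.Chars.rstrip u := by
    simp [PySem.Str.strip, PySem.Chars.strip, hlstrip]
  -- one keyword case, generic in base = "query" / "mutation"
  have main : ∀ (base v0 : List Char),
      (∀ c ∈ base, PySem.Chars.isspace c = false) → base ≠ [] →
      ("query ".toList = base ++ [' '] ∨ "mutation ".toList = base ++ [' ']) →
      u = base ++ [' '] ++ v0 →
      pvLoopA q (String.ofList w :: ls) =
        (match v0.dropWhile pvNlWS with
         | [] => pvLoopA q ls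
         | d :: ds => String.ofList (PySem.Chars.lower ((d :: ds).takeWhile pvTokChar))) := by
    intro base v0 hbs hb0 hbase hdecomp
    have hv0nl : '\n' ∉ v0 := fun h => hunl (hdecomp ▸ (by simp [h]))
    have hrs : PySem.Chars.rstrip u = PySem.Chars.rstrip (base ++ ' ' :: v0) := by
      rw [hdecomp]; simp
    cases hvd : v0.dropWhile pvNlWS with
    | nil =>
      -- keyword followed by whitespace only: A's stripped line is just `base`, no startswith
      have hstr2 : (PySem.Str.strip (String.ofList w)).toList = base := by
        rw [hstrip, hrs, pv_stripped_nomatch base v0 hbs hvd]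
      have hsw1 : PySem.Str.startswith (PySem.Str.strip (String.ofList w)) "query " = false := by
        show PySem.Chars.startswith _ _ = false
        rw [hstr2]
        rw [PySem.Chars.startswith, Bool.eq_false_iff, Ne]
        intro hpre
        rcases List.isPrefixOf_iff_prefix.mp hpre with ⟨t2, ht2⟩
        have hsp : ' ' ∈ base := by
          rw [← ht2]
          simp
        have h1 := hbs ' ' hsp
        have h2 : PySem.Chars.isspace ' ' = true := by decide
        rw [h1] at h2
        exact absurd h2 (by simp)
      have hsw2 : PySem.Str.startswith (PySem.Str.strip (String.ofList w)) "mutation " = false := by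
        show PySem.Chars.startswith _ _ = false
        rw [hstr2]
        rw [PySem.Chars.startswith, Bool.eq_false_iff, Ne]
        intro hpre
        rcases List.isPrefixOf_iff_prefix.mp hpre with ⟨t2, ht2⟩
        have hsp : ' ' ∈ base := by
          rw [← ht2]
          simp
        have h1 := hbs ' ' hsp
        have h2 : PySem.Chars.isspace ' ' = true := by decide
        rw [h1] at h2
        exact absurd h2 (by simp)
      conv_lhs => rw [pvLoopA]
      rw [hsw1, hsw2]
      simp
    | cons d ds =>
      have hdnl : d ≠ '\n' := by
        intro h
        apply hv0nl
        subst h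
        exact (List.dropWhile_sublist _ (l := v0)).mem (by rw [hvd]; simp)
      have hd : PySem.Chars.isspace d = false :=
        pv_isspace_of_not_nlws (pv_dropWhile_head _ _ _ _ hvd) hdnl
      -- A's startswith fires
      have hsw : PySem.Str.startswith (PySem.Str.strip (String.ofList w))
          (String.ofList (base ++ [' '])) = true := by
        show PySem.Chars.startswith _ _ = true
        rw [hstrip, hrs]
        have hw1 : v0 = v0.takeWhile pvNlWS ++ (d :: ds) := by
          conv_lhs => rw [← List.takeWhile_append_dropWhile (p := pvNlWS) (l := v0)]
          rw [hvd]
        have hre : PySem.Chars.rstrip (base ++ ' ' :: v0) =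
            (base ++ ' ' :: v0.takeWhile pvNlWS) ++ PySem.Chars.rstrip (d :: ds) := by
          rw [show base ++ ' ' :: v0 = (base ++ ' ' :: v0.takeWhile pvNlWS) ++ (d :: ds) from by
            conv_lhs => rw [hw1]
            simp]
          exact pv_rstrip_append_nonws _ _ ⟨d, by simp, hd⟩
        rw [hre, PySem.Chars.startswith]
        apply List.isPrefixOf_iff_prefix.mpr
        refine ⟨v0.takeWhile pvNlWS ++ PySem.Chars.rstrip (d :: ds), ?_⟩
        simp
      have hcond : (PySem.Str.startswith (PySem.Str.strip (String.ofList w)) "query " ||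
          PySem.Str.startswith (PySem.Str.strip (String.ofList w)) "mutation ") = true := by
        rcases hbase with hb | hb
        · rw [show ("query " : String) = String.ofList (base ++ [' ']) from by
            rw [← hb]; rfl]
          rw [hsw]; simp
        · rw [show ("mutation " : String) = String.ofList (base ++ [' ']) from by
            rw [← hb]; rfl]
          rw [hsw]
          simp
      -- A's parts
      have hparts : PySem.Str.split₀ (PySem.Str.strip (String.ofList w)) =
          (PySem.Chars.split₀ (PySem.Chars.rstrip (base ++ ' ' :: v0))).map String.ofList := by
        show (PySem.Chars.split₀ (PySem.Str.strip (String.ofList w)).toList).map String.ofList = _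
        rw [hstrip, hrs]
      rw [pv_parts base v0 d ds hbs hb0 hvd hd] at hparts
      conv_lhs => rw [pvLoopA]
      rw [hcond]
      simp only [if_true, hparts]
      rw [if_pos (by simp)]
      -- the extracted name
      have hget : (((PySem.Chars.split₀ (PySem.Chars.rstrip (base ++ ' ' :: v0))).map
          String.ofList).getD 1 "") = String.ofList
            ((PySem.Chars.rstrip (d :: ds)).takeWhile (fun c => !PySem.Chars.isspace c)) := by
        rw [pv_parts base v0 d ds hbs hb0 hvd hd]
        rfl
      rw [show (List.map String.ofList
            (base :: (PySem.Chars.rstrip (d :: ds)).takeWhile (fun c => !PySem.Chars.isspace c) ::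
              PySem.Chars.split₀
                ((PySem.Chars.rstrip (d :: ds)).dropWhile (fun c => !PySem.Chars.isspace c)))).getD 1 ""
          = String.ofList ((PySem.Chars.rstrip (d :: ds)).takeWhile (fun c => !PySem.Chars.isspace c))
          from rfl]
      set tok2 := (PySem.Chars.rstrip (d :: ds)).takeWhile (fun c => !PySem.Chars.isspace c) with htok2
      have hsplit2 : PySem.Str.split? (String.ofList tok2) "(" =
          some ((PySem.Chars.splitOn tok2 ['(']).map String.ofList) := by
        simp [PySem.Str.split?, PySem.Chars.split?]
      rw [hsplit2]
      simp only [Option.getD_some]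
      rw [pv_headD_map_ofList, pv_splitOn_head]
      simp only [PySem.Str.lower, String.toList_ofList]
      rw [htok2, pv_token_eq d ds hd]
  -- dispatch on which keyword (if any) starts the stripped line
  by_cases hq : "query ".toList <+: u
  · obtain ⟨v0, hv0⟩ := hq
    have hdecomp : u = "query".toList ++ [' '] ++ v0 := by
      rw [← hv0, show "query ".toList = "query".toList ++ [' '] from by simp]
    rw [main "query".toList v0 (by intro c hc; simp at hc; rcases hc with rfl|rfl|rfl|rfl|rfl <;> decide) (by simp) (Or.inl (by simp)) hdecomp]
    have hpre : "query ".toList.isPrefixOf (u ++ rest) = true :=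
      List.isPrefixOf_iff_prefix.mpr ⟨v0 ++ rest, by rw [← List.append_assoc, hv0]⟩
    have hdrop : (u ++ rest).drop 6 = v0 ++ rest := by
      rw [← hv0, show (6 : Nat) = ("query ".toList).length from by simp,
        List.append_assoc, List.drop_left]
    have hhit : pvHit (w ++ rest) =
        match v0.dropWhile pvNlWS ++ rest with
        | [] => none
        | d :: ds => if d = '\n' then none else some ((d :: ds).takeWhile pvTokChar) := by
      rw [pvHit, huw, pvKw, if_pos hpre]
      show (match (List.drop 6 (u ++ rest)).dropWhile pvNlWS with
        | [] => none
        | d :: ds => if d = '\n' then none else some ((d :: ds).takeWhile pvTokChar)) = _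
      rw [hdrop, pv_dropWhile_nlws_append v0 rest hrest]
    rw [hhit]
    cases hvd : v0.dropWhile pvNlWS with
    | nil =>
      simp only [List.nil_append]
      rcases hrest with rfl | ⟨t, rfl⟩
      · rfl
      · simp
    | cons d ds =>
      have hdnl : d ≠ '\n' := by
        intro h
        subst h
        have hmem : '\n' ∈ v0 := (List.dropWhile_sublist _ (l := v0)).mem (by rw [hvd]; simp)
        exact hunl (hdecomp ▸ (by simp [hmem] : '\n' ∈ "query".toList ++ [' '] ++ v0))
      have habs : List.takeWhile pvTokChar (d :: (ds ++ rest)) = List.takeWhile pvTokChar (d :: ds) := by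
        rw [show d :: (ds ++ rest) = (d :: ds) ++ rest from rfl]
        apply pv_takeWhile_append_eq
        rcases hrest with rfl | ⟨t, rfl⟩
        · rfl
        · rw [List.takeWhile_cons, if_neg (by decide)]
      show _ = match (if d = '\n' then none else some (List.takeWhile pvTokChar (d :: (ds ++ rest)))) with
        | some tok => String.ofList (PySem.Chars.lower tok)
        | none => pvLoopA q ls
      rw [if_neg hdnl, habs]
  · by_cases hm : "mutation ".toList <+: u
    · obtain ⟨v0, hv0⟩ := hm
      have hdecomp : u = "mutation".toList ++ [' '] ++ v0 := by
        rw [← hv0, show "mutation ".toList = "mutation".toList ++ [' '] from by simp]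
      rw [main "mutation".toList v0 (by intro c hc; simp at hc; rcases hc with rfl|rfl|rfl|rfl|rfl|rfl|rfl|rfl <;> decide) (by simp) (Or.inr (by simp)) hdecomp]
      have hpre1 : "query ".toList.isPrefixOf (u ++ rest) = false := by
        rw [Bool.eq_false_iff, Ne]
        intro h
        exact hq ((pv_prefix_line _ u rest hrest (by simp)).mp
          (List.isPrefixOf_iff_prefix.mp h))
      have hpre : "mutation ".toList.isPrefixOf (u ++ rest) = true :=
        List.isPrefixOf_iff_prefix.mpr ⟨v0 ++ rest, by rw [← List.append_assoc, hv0]⟩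
      have hdrop : (u ++ rest).drop 9 = v0 ++ rest := by
        rw [← hv0, show (9 : Nat) = ("mutation ".toList).length from by simp,
          List.append_assoc, List.drop_left]
      have hhit : pvHit (w ++ rest) =
          match v0.dropWhile pvNlWS ++ rest with
          | [] => none
          | d :: ds => if d = '\n' then none else some ((d :: ds).takeWhile pvTokChar) := by
        rw [pvHit, huw, pvKw, if_neg (by rw [hpre1]; simp), if_pos hpre]
        show (match (List.drop 9 (u ++ rest)).dropWhile pvNlWS with
          | [] => none
          | d :: ds => if d = '\n' then none else some ((d :: ds).takeWhile pvTokChar)) = _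
        rw [hdrop, pv_dropWhile_nlws_append v0 rest hrest]
      rw [hhit]
      cases hvd : v0.dropWhile pvNlWS with
      | nil =>
        simp only [List.nil_append]
        rcases hrest with rfl | ⟨t, rfl⟩
        · rfl
        · simp
      | cons d ds =>
        have hdnl : d ≠ '\n' := by
          intro h
          subst h
          have hmem : '\n' ∈ v0 := (List.dropWhile_sublist _ (l := v0)).mem (by rw [hvd]; simp)
          exact hunl (hdecomp ▸ (by simp [hmem] : '\n' ∈ "mutation".toList ++ [' '] ++ v0))
        have habs : List.takeWhile pvTokChar (d :: (ds ++ rest)) = List.takeWhile pvTokChar (d :: ds) := by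
          rw [show d :: (ds ++ rest) = (d :: ds) ++ rest from rfl]
          apply pv_takeWhile_append_eq
          rcases hrest with rfl | ⟨t, rfl⟩
          · rfl
          · rw [List.takeWhile_cons, if_neg (by decide)]
        show _ = match (if d = '\n' then none else some (List.takeWhile pvTokChar (d :: (ds ++ rest)))) with
          | some tok => String.ofList (PySem.Chars.lower tok)
          | none => pvLoopA q ls
        rw [if_neg hdnl, habs]
    · -- no keyword: A skips the line, B finds no hit
      have hpre1 : "query ".toList.isPrefixOf (u ++ rest) = false := by
        rw [Bool.eq_false_iff, Ne]
        intro h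
        exact hq ((pv_prefix_line _ u rest hrest (by simp)).mp
          (List.isPrefixOf_iff_prefix.mp h))
      have hpre2 : "mutation ".toList.isPrefixOf (u ++ rest) = false := by
        rw [Bool.eq_false_iff, Ne]
        intro h
        exact hm ((pv_prefix_line _ u rest hrest (by simp)).mp
          (List.isPrefixOf_iff_prefix.mp h))
      have hhit : pvHit (w ++ rest) = none := by
        rw [pvHit, huw, pvKw, if_neg (by rw [hpre1]; simp), if_neg (by rw [hpre2]; simp)]
      rw [hhit]
      have hsq : PySem.Str.startswith (PySem.Str.strip (String.ofList w)) "query " = false := by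
        show PySem.Chars.startswith _ _ = false
        rw [hstrip, Bool.eq_false_iff, Ne, PySem.Chars.startswith]
        intro h
        exact hq ((List.isPrefixOf_iff_prefix.mp h).trans (pv_rstrip_prefix u))
      have hsm : PySem.Str.startswith (PySem.Str.strip (String.ofList w)) "mutation " = false := by
        show PySem.Chars.startswith _ _ = false
        rw [hstrip, Bool.eq_false_iff, Ne, PySem.Chars.startswith]
        intro h
        exact hm ((List.isPrefixOf_iff_prefix.mp h).trans (pv_rstrip_prefix u))
      conv_lhs => rw [pvLoopA]
      rw [hsq, hsm]
      simp


-- pvScan one-step characterizations (the WF equations, resolved per line shape)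
theorem pv_scan_nil : pvScan [] = none := by rw [pvScan.eq_def]

theorem pv_scan_cons (w t : List Char) (hwnl : '\n' ∉ w) :
    pvScan (w ++ '\n' :: t) =
      match pvHit (w ++ '\n' :: t) with
      | some tok => some tok
      | none => pvScan t := by
  have hwnilp : List.dropWhile (fun x => !(x == '\n')) w = [] :=
    List.dropWhile_eq_nil_iff.mpr (fun x hx => by
      have : x ≠ '\n' := fun h => hwnl (h ▸ hx)
      simp [this])
  have hwdrop : (w ++ '\n' :: t).dropWhile (fun x => !(x == '\n')) = '\n' :: t := by
    rw [List.dropWhile_append, hwnilp]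
    simp
  cases hw0 : w with
  | nil =>
    subst hw0
    rw [List.nil_append] at hwdrop ⊢
    rw [pvScan.eq_def]
    cases hh : pvHit ('\n' :: t) with
    | some tok => simp only [hh]
    | none =>
      simp only [hh]
      split
      · rename_i heq
        rw [hwdrop] at heq
        cases heq
      · rename_i head t' heq
        rw [hwdrop] at heq
        cases heq
        rfl
  | cons c w' =>
    subst hw0
    rw [List.cons_append] at hwdrop ⊢
    rw [pvScan.eq_def]
    cases hh : pvHit (c :: (w' ++ '\n' :: t)) with
    | some tok => simp only [hh]
    | none =>
      simp only [hh]
      split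
      · rename_i heq
        rw [hwdrop] at heq
        cases heq
      · rename_i head t' heq
        rw [hwdrop] at heq
        cases heq
        rfl

theorem pv_scan_nonl (cs : List Char) (hnl : '\n' ∉ cs) :
    pvScan cs = match pvHit cs with | some tok => some tok | none => none := by
  cases cs with
  | nil => rw [pv_scan_nil, show pvHit [] = none from by decide]
  | cons c cs' =>
    have hw0 : (c :: cs').dropWhile (fun x => !(x == '\n')) = [] :=
      List.dropWhile_eq_nil_iff.mpr (fun x hx => by
        have : x ≠ '\n' := fun h => hnl (h ▸ hx)
        simp [this])
    rw [pvScan.eq_def]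
    cases hh : pvHit (c :: cs') with
    | some tok => simp only [hh]
    | none =>
      simp only [hh]
      split
      · rfl
      · rename_i head t' heq
        rw [hw0] at heq
        cases heq

-- the whole-string agreement: A's loop over splitOn-lines = B's scan
theorem pv_scan_eq (q : String) :
    ∀ (n : Nat) (cs : List Char), cs.length ≤ n →
      pvLoopA q ((PySem.Chars.splitOn cs ['\n']).map String.ofList) =
        match pvScan cs with
        | some tok => String.ofList (PySem.Chars.lower tok)
        | none => pvFallbackA q := by
  intro n
  induction n with
  | zero =>
    intro cs hlen
    have hcs : cs = [] := List.eq_nil_of_length_eq_zero (Nat.le_zero.mp hlen)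
    subst hcs
    rw [pv_splitOn_nosep '\n' [] (by simp), List.map_cons, List.map_nil,
      pv_line q [] [] [] (by simp) (Or.inl rfl), List.append_nil,
      show pvHit [] = none from by decide, pv_scan_nil]
    rfl
  | succ n ih =>
    intro cs hlen
    by_cases hnl : '\n' ∈ cs
    · have hdw : cs.dropWhile (fun x => !(x == '\n')) ≠ [] := by
        rw [Ne, List.dropWhile_eq_nil_iff]
        intro hall
        have := hall '\n' hnl
        simp at this
      cases hd : cs.dropWhile (fun x => !(x == '\n')) with
      | nil => exact absurd hd hdw
      | cons e t =>
        have he : e = '\n' := by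
          have := pv_dropWhile_head _ _ _ _ hd
          simpa using this
        subst he
        have hdec : cs = cs.takeWhile (fun x => !(x == '\n')) ++ '\n' :: t := by
          conv_lhs => rw [← List.takeWhile_append_dropWhile (p := fun x => !(x == '\n')) (l := cs)]
          rw [hd]
        set w := cs.takeWhile (fun x => !(x == '\n')) with hwdef
        have hwnl : '\n' ∉ w := fun h => by
          have := List.mem_takeWhile_imp (hwdef ▸ h)
          simp at this
        have hlt : t.length ≤ n := by
          have := congrArg List.length hdec
          simp at this
          omega
        rw [hdec, pv_splitOn_cons '\n' w t hwnl, List.map_cons,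
          pv_line q ((PySem.Chars.splitOn t ['\n']).map String.ofList) w ('\n' :: t) hwnl
            (Or.inr ⟨t, rfl⟩), ih t hlt, pv_scan_cons w t hwnl]
        cases hh : pvHit (w ++ '\n' :: t) <;> rfl
    · rw [pv_splitOn_nosep '\n' cs hnl, List.map_cons, List.map_nil,
        pv_line q [] cs [] hnl (Or.inl rfl), List.append_nil, pv_scan_nonl cs hnl]
      cases hh : pvHit cs <;> rfl

-- ===== VERDICT (by name: the statement is the Claim_ definition above) =====
theorem generate_query_name_spec : Claim_equal_generate_query_name := by
  intro query _
  show generate_query_name query = generate_query_name_alt query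
  unfold generate_query_name generate_query_name_alt
  have hlines : (PySem.Str.split? (PySem.Str.strip query) "\n").getD [] =
      (PySem.Chars.splitOn (PySem.Str.strip query).toList ['\n']).map String.ofList := by
    simp [PySem.Str.split?, PySem.Chars.split?]
  rw [hlines, pv_scan_eq query (PySem.Str.strip query).toList.length _ le_rfl]
  cases h : pvScan (PySem.Str.strip query).toList
  · show pvFallbackA query = _
    rw [pvFallbackA]
  · rfl
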